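-- pv_equiv track=rewrite | github.com/Dharshantfs/production_planning | production_planning/production_planning/doctype/planning_sheet/planning_sheet.py | extract_quality_and_color
-- ===== SOURCE A (Python) =====
-- def extract_quality_and_color(item_name):
--     """Extract quality and color from item name"""
--     QUAL_LIST = ["SUPER PLATINUM", "SUPER CLASSIC", "SUPER ECO", "ECO SPECIAL",
--                  "ECO GREEN", "ECO SPL", "LIFE STYLE", "LIFESTYLE", "PREMIUM",
--                  "PLATINUM", "CLASSIC", "DELUXE", "BRONZE", "SILVER", "ULTRA",
--                  "GOLD", "UV"]
--     QUAL_LIST.sort(key=len, reverse=True)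
--
--     COL_LIST = ["GOLDEN YELLOW", "BRIGHT WHITE", "SUPER WHITE", "BLACK", "RED",
--                 "BLUE", "GREEN", "MILKY WHITE", "SUNSHINE WHITE", "BLEACH WHITE",
--                 "LEMON YELLOW", "BRIGHT ORANGE", "DARK ORANGE", "BABY PINK",
--                 "DARK PINK", "CRIMSON RED", "LIGHT MAROON", "DARK MAROON",
--                 "MEDICAL BLUE", "PEACOCK BLUE", "RELIANCE GREEN", "PARROT GREEN",
--                 "ROYAL BLUE", "NAVY BLUE", "LIGHT GREY", "DARK GREY",
--                 "CHOCOLATE BROWN", "LIGHT BEIGE", "DARK BEIGE", "WHITE MIX",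
--                 "BLACK MIX", "COLOR MIX", "BEIGE MIX", "WHITE"]
--     COL_LIST.sort(key=len, reverse=True)
--
--     quality = ""
--     color = ""
--     item_upper = item_name.upper()
--
--     # Extract quality
--     for qual in QUAL_LIST:
--         if qual in item_upper:
--             quality = qual
--             break
--
--     # Extract color
--     for col in COL_LIST:
--         if col in item_upper:
--             color = col
--             break
--
--     return quality, color
-- ===== SOURCE B (Python) =====
-- QUAL_CSV = ("SUPER PLATINUM,SUPER CLASSIC,SUPER ECO,ECO SPECIAL,ECO GREEN,"
--             "ECO SPL,LIFE STYLE,LIFESTYLE,PREMIUM,PLATINUM,CLASSIC,DELUXE,"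
--             "BRONZE,SILVER,ULTRA,GOLD,UV")
--
-- COL_CSV = ("GOLDEN YELLOW,BRIGHT WHITE,SUPER WHITE,BLACK,RED,BLUE,GREEN,"
--            "MILKY WHITE,SUNSHINE WHITE,BLEACH WHITE,LEMON YELLOW,"
--            "BRIGHT ORANGE,DARK ORANGE,BABY PINK,DARK PINK,CRIMSON RED,"
--            "LIGHT MAROON,DARK MAROON,MEDICAL BLUE,PEACOCK BLUE,"
--            "RELIANCE GREEN,PARROT GREEN,ROYAL BLUE,NAVY BLUE,LIGHT GREY,"
--            "DARK GREY,CHOCOLATE BROWN,LIGHT BEIGE,DARK BEIGE,WHITE MIX,"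
--            "BLACK MIX,COLOR MIX,BEIGE MIX,WHITE")
--
--
-- def _longest_match(csv, text):
--     """Longest keyword of the comma-separated list occurring in text
--     (first one in list order on length ties), '' if none matches."""
--     best = ""
--     for kw in csv.split(","):
--         if kw in text and len(best) < len(kw):
--             best = kw
--     return best
--
--
-- def extract_quality_and_color(item_name):
--     """Extract quality and color from item name"""
--     item_upper = item_name.upper()
--     return _longest_match(QUAL_CSV, item_upper), _longest_match(COL_CSV, item_upper)
-- ===== Notes on version B (the rewrite author's own statement) =====
-- stated objective: alternative
-- what changed: Replaces A's sort-both-keyword-lists-by-length-descending then first-match-break scan with a shared helper that keeps a running longest-matching keyword in one accumulator pass over CSV-encoded keyword tables, so no sorting pass remains.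
import Mathlib
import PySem

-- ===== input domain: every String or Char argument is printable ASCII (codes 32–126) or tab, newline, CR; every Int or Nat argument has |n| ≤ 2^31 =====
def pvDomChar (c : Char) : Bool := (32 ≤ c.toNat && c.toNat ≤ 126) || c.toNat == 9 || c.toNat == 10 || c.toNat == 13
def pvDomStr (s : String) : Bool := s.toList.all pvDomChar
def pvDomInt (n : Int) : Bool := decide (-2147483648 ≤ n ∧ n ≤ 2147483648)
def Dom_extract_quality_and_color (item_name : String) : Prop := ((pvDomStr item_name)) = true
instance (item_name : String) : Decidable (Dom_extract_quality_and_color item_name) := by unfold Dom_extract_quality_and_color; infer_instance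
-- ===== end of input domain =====

-- B replaces A's sort-by-length-descending + first-match-break scan by one
-- running-longest-match accumulator loop over CSV-encoded keyword tables (simpler: no sorting pass).

-- ===== PORT A =====
-- A's 'for qual in L: if qual in up: quality = qual; break' starting from quality = ""
def pvFirstMatch (p : String → Bool) : List String → String
  | [] => ""
  | q :: rest => if p q then q else pvFirstMatch p rest

def extract_quality_and_color (item_name : String) : String × String :=
  let QUAL_LIST : List String :=
    ["SUPER PLATINUM", "SUPER CLASSIC", "SUPER ECO", "ECO SPECIAL",
     "ECO GREEN", "ECO SPL", "LIFE STYLE", "LIFESTYLE", "PREMIUM",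
     "PLATINUM", "CLASSIC", "DELUXE", "BRONZE", "SILVER", "ULTRA",
     "GOLD", "UV"]
  let QUAL_SORTED := PySem.List.sorted QUAL_LIST PySem.Str.len true
  let COL_LIST : List String :=
    ["GOLDEN YELLOW", "BRIGHT WHITE", "SUPER WHITE", "BLACK", "RED",
     "BLUE", "GREEN", "MILKY WHITE", "SUNSHINE WHITE", "BLEACH WHITE",
     "LEMON YELLOW", "BRIGHT ORANGE", "DARK ORANGE", "BABY PINK",
     "DARK PINK", "CRIMSON RED", "LIGHT MAROON", "DARK MAROON",
     "MEDICAL BLUE", "PEACOCK BLUE", "RELIANCE GREEN", "PARROT GREEN",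
     "ROYAL BLUE", "NAVY BLUE", "LIGHT GREY", "DARK GREY",
     "CHOCOLATE BROWN", "LIGHT BEIGE", "DARK BEIGE", "WHITE MIX",
     "BLACK MIX", "COLOR MIX", "BEIGE MIX", "WHITE"]
  let COL_SORTED := PySem.List.sorted COL_LIST PySem.Str.len true
  let item_upper := PySem.Str.upper item_name
  let quality := pvFirstMatch (fun q => PySem.Str.isIn q item_upper) QUAL_SORTED
  let color := pvFirstMatch (fun c => PySem.Str.isIn c item_upper) COL_SORTED
  (quality, color)

-- ===== PORT B =====
def pvQualCsv : String :=
  "SUPER PLATINUM,SUPER CLASSIC,SUPER ECO,ECO SPECIAL,ECO GREEN,ECO SPL,LIFE STYLE,LIFESTYLE,PREMIUM,PLATINUM,CLASSIC,DELUXE,BRONZE,SILVER,ULTRA,GOLD,UV"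

def pvColCsv : String :=
  "GOLDEN YELLOW,BRIGHT WHITE,SUPER WHITE,BLACK,RED,BLUE,GREEN,MILKY WHITE,SUNSHINE WHITE,BLEACH WHITE,LEMON YELLOW,BRIGHT ORANGE,DARK ORANGE,BABY PINK,DARK PINK,CRIMSON RED,LIGHT MAROON,DARK MAROON,MEDICAL BLUE,PEACOCK BLUE,RELIANCE GREEN,PARROT GREEN,ROYAL BLUE,NAVY BLUE,LIGHT GREY,DARK GREY,CHOCOLATE BROWN,LIGHT BEIGE,DARK BEIGE,WHITE MIX,BLACK MIX,COLOR MIX,BEIGE MIX,WHITE"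

-- the loop body of _longest_match: keep the running longest matching keyword
def pvBStep (text best kw : String) : String :=
  if PySem.Str.isIn kw text = true ∧ PySem.Str.len best < PySem.Str.len kw then kw else best

-- _longest_match(csv, text): accumulator loop over csv.split(",")
def pvLongestMatch (csv text : String) : String :=
  List.foldl (pvBStep text) "" ((PySem.Str.split? csv ",").getD [])  -- sep "," is nonempty, so split? is `some`

def extract_quality_and_color_alt (item_name : String) : String × String :=
  let item_upper := PySem.Str.upper item_name
  (pvLongestMatch pvQualCsv item_upper, pvLongestMatch pvColCsv item_upper)

-- ===== PRECONDITION & SPEC =====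
def Spec_extract_quality_and_color (item_name : String) (out : String × String) : Prop := out = extract_quality_and_color_alt item_name
instance (item_name : String) (out : String × String) : Decidable (Spec_extract_quality_and_color item_name out) := by unfold Spec_extract_quality_and_color; infer_instance

-- ===== CLAIM (what is proved, stated in full; the proofs are below) =====
def Claim_equal_extract_quality_and_color : Prop := ∀ (item_name : String), Dom_extract_quality_and_color item_name → Spec_extract_quality_and_color item_name (extract_quality_and_color item_name)

-- ===== LEMMAS AND PROOFS =====

-- the step of Python max with key=len
def pvStep (acc : Option String) (x : String) : Option String :=
  match acc with
  | none => some x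
  | some m => if PySem.Str.len m < PySem.Str.len x then some x else some m

lemma pv_max?_eq_foldl (xs : List String) :
    PySem.List.max? xs PySem.Str.len = List.foldl pvStep none xs := by
  unfold PySem.List.max?
  congr 1
  funext acc x
  cases acc <;> rfl

-- once the running max holds a0 and nothing later is strictly longer, it stays a0
lemma pv_max_fold_stay (l : List String) (a0 : String)
    (h : ∀ y ∈ l, ¬ PySem.Str.len a0 < PySem.Str.len y) :
    List.foldl pvStep (some a0) l = some a0 := by
  induction l with
  | nil => rfl
  | cons y t ih =>
      simp only [List.foldl_cons, pvStep]
      rw [if_neg (h y (List.mem_cons_self))]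
      exact ih (fun z hz => h z (List.mem_cons_of_mem _ hz))

-- Python max of a nonempty list whose head is a maximum is the head
lemma pv_max?_cons_of_head_max (a : String) (t : List String)
    (h : ∀ y ∈ t, PySem.Str.len y ≤ PySem.Str.len a) :
    PySem.List.max? (a :: t) PySem.Str.len = some a := by
  rw [pv_max?_eq_foldl, List.foldl_cons]
  exact pv_max_fold_stay t a (fun y hy => not_lt.mpr (h y hy))

-- on a length-descending list, first match = max-by-length of the matches
lemma pv_firstMatch_eq_maxD_of_desc (L : List String)
    (hL : L.Pairwise (fun a b => PySem.Str.len b ≤ PySem.Str.len a))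
    (p : String → Bool) :
    pvFirstMatch p L = PySem.List.maxD (L.filter p) PySem.Str.len "" := by
  induction L with
  | nil => rfl
  | cons a t ih =>
      rcases List.pairwise_cons.mp hL with ⟨ha, ht⟩
      by_cases hp : p a
      · simp only [pvFirstMatch, hp, if_true, List.filter_cons, PySem.List.maxD]
        rw [pv_max?_cons_of_head_max a (t.filter p)
            (fun y hy => ha y (List.mem_of_mem_filter hy))]
        rfl
      · simp only [pvFirstMatch, hp, if_false, Bool.false_eq_true, List.filter_cons]
        exact ih ht

-- the comparator used by sorted … true
def pvBf : String → String → Bool := fun a b => decide (PySem.Str.len b < PySem.Str.len a)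

-- filtering commutes with a stable insertion into a descending list
lemma pv_insertBy_filter (p : String → Bool) (x : String) (ys : List String)
    (hys : ys.Pairwise (fun a b => PySem.Str.len b ≤ PySem.Str.len a)) :
    (PySem.List.insertBy pvBf x ys).filter p =
      if p x then PySem.List.insertBy pvBf x (ys.filter p) else ys.filter p := by
  induction ys with
  | nil =>
      simp [PySem.List.insertBy, List.filter_cons]
  | cons a t ih =>
      rcases List.pairwise_cons.mp hys with ⟨ha, ht⟩
      by_cases hb : pvBf x a = true
      · -- x goes in front of a
        simp only [PySem.List.insertBy, hb, if_true]
        by_cases hp : p x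
        · by_cases hpa : p a
          · simp [hp, hpa, PySem.List.insertBy, hb]
          · -- a filtered out: x must still go to the front of t.filter p
            simp only [List.filter_cons, hp, hpa, if_true, Bool.false_eq_true, if_false]
            cases hft : t.filter p with
            | nil => simp [PySem.List.insertBy]
            | cons y ys' =>
                have hyt : y ∈ t := List.mem_of_mem_filter (hft ▸ List.mem_cons_self)
                have hxy : pvBf x y = true := by
                  have h1 : PySem.Str.len y ≤ PySem.Str.len a := ha y hyt
                  have h2 : PySem.Str.len a < PySem.Str.len x := of_decide_eq_true hb
                  simpa [pvBf] using lt_of_le_of_lt h1 h2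
                simp [PySem.List.insertBy, hxy]
        · simp [List.filter_cons, hp]
      · -- x goes after a
        simp only [PySem.List.insertBy, hb, Bool.false_eq_true, if_false]
        by_cases hp : p x
        · by_cases hpa : p a
          · simp only [List.filter_cons, hpa, hp, if_true, ih ht, PySem.List.insertBy, hb,
              Bool.false_eq_true, if_false]
          · simp only [List.filter_cons, hpa, hp, Bool.false_eq_true, if_false, if_true, ih ht]
        · by_cases hpa : p a
          · simp only [List.filter_cons, hpa, hp, if_true, Bool.false_eq_true, if_false, ih ht]
          · simp only [List.filter_cons, hpa, hp, Bool.false_eq_true, if_false, ih ht]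

-- stable sort commutes with filter
lemma pv_filter_sorted (p : String → Bool) (xs : List String) :
    (PySem.List.sorted xs PySem.Str.len true).filter p =
      PySem.List.sorted (xs.filter p) PySem.Str.len true := by
  induction xs using List.reverseRecOn with
  | nil => rfl
  | append_singleton xs x ih =>
      have hs : ∀ (l : List String),
          PySem.List.sorted (l ++ [x]) PySem.Str.len true =
            PySem.List.insertBy pvBf x (PySem.List.sorted l PySem.Str.len true) := by
        intro l
        rw [PySem.List.sorted_rev_eq_foldl_insertBy, PySem.List.sorted_rev_eq_foldl_insertBy,
          List.foldl_append]
        rfl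
      rw [hs, pv_insertBy_filter p x _ (PySem.List.sorted_pairwise_rev xs PySem.Str.len),
        List.filter_append]
      by_cases hp : p x
      · simp only [hp, if_true, List.filter_cons, List.filter_nil, ih, hs]
      · simp only [hp, Bool.false_eq_true, if_false, List.filter_cons, List.filter_nil,
          List.append_nil, ih]

-- Python max (first maximal element) is the head of the stable descending sort
lemma pv_max?_eq_head_sorted (xs : List String) :
    PySem.List.max? xs PySem.Str.len = (PySem.List.sorted xs PySem.Str.len true).head? := by
  induction xs using List.reverseRecOn with
  | nil => rfl
  | append_singleton xs x ih =>
      have hs : PySem.List.sorted (xs ++ [x]) PySem.Str.len true =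
          PySem.List.insertBy pvBf x (PySem.List.sorted xs PySem.Str.len true) := by
        rw [PySem.List.sorted_rev_eq_foldl_insertBy, PySem.List.sorted_rev_eq_foldl_insertBy,
          List.foldl_append]
        rfl
      have hm : PySem.List.max? (xs ++ [x]) PySem.Str.len =
          pvStep (PySem.List.max? xs PySem.Str.len) x := by
        rw [pv_max?_eq_foldl, pv_max?_eq_foldl, List.foldl_append]
        rfl
      rw [hm, hs, ih]
      cases hsx : PySem.List.sorted xs PySem.Str.len true with
      | nil => simp [PySem.List.insertBy, pvStep]
      | cons m t =>
          by_cases hc : PySem.Str.len m < PySem.Str.len x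
          · have hb : pvBf x m = true := by simpa [pvBf] using hc
            have hc' : m.length < x.length := by simpa [PySem.Str.len] using hc
            simp [PySem.List.insertBy, pvStep, hb, hc']
          · have hb : ¬ pvBf x m = true := by simpa [pvBf] using hc
            have hc' : ¬ m.length < x.length := by simpa [PySem.Str.len] using hc
            simp [PySem.List.insertBy, pvStep, hb, hc']

-- A's scan over the sorted list = max-by-length over the matches
lemma pv_component (xs : List String) (p : String → Bool) :
    pvFirstMatch p (PySem.List.sorted xs PySem.Str.len true) =
      PySem.List.maxD (xs.filter p) PySem.Str.len "" := by
  rw [pv_firstMatch_eq_maxD_of_desc _ (PySem.List.sorted_pairwise_rev xs PySem.Str.len) p,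
    pv_filter_sorted]
  have h2 : PySem.List.max? (PySem.List.sorted (xs.filter p) PySem.Str.len true) PySem.Str.len =
      (PySem.List.sorted (xs.filter p) PySem.Str.len true).head? := by
    cases hsx : PySem.List.sorted (xs.filter p) PySem.Str.len true with
    | nil => rfl
    | cons a t =>
        have hpw := PySem.List.sorted_pairwise_rev (xs.filter p) PySem.Str.len
        rw [hsx] at hpw
        rcases List.pairwise_cons.mp hpw with ⟨ha, _⟩
        simp [pv_max?_cons_of_head_max a t ha]
  simp only [PySem.List.maxD, h2, pv_max?_eq_head_sorted]

-- B's accumulator loop = the option-valued running max restricted to the matches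
lemma pv_fold_eq_filter (text : String) (xs : List String) (best : String) :
    List.foldl (pvBStep text) best xs =
      (List.foldl pvStep (some best) (xs.filter (fun q => PySem.Str.isIn q text))).getD "" := by
  induction xs generalizing best with
  | nil => rfl
  | cons y t ih =>
      by_cases hp : PySem.Str.isIn y text = true
      · by_cases hl : PySem.Str.len best < PySem.Str.len y
        · simp only [List.foldl_cons, List.filter_cons, hp, if_true, pvBStep, pvStep,
            hl, and_true]
          exact ih y
        · simp only [List.foldl_cons, List.filter_cons, hp, if_true, pvBStep, pvStep,
            hl, and_false, ite_false]
          exact ih best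
      · simp only [List.foldl_cons, List.filter_cons, hp, Bool.false_eq_true, if_false,
          pvBStep, false_and]
        exact ih best

-- seeding the running max with "" is the same as seeding with none when all keywords are nonempty
lemma pv_seed_empty (l : List String) (h : ∀ y ∈ l, 0 < PySem.Str.len y) :
    (List.foldl pvStep (some "") l).getD "" = (List.foldl pvStep none l).getD "" := by
  cases l with
  | nil => rfl
  | cons y t =>
      have hy : PySem.Str.len "" < PySem.Str.len y := h y List.mem_cons_self
      simp only [List.foldl_cons, pvStep, hy, ite_true]

-- B's loop computes max-by-length of the matches (keywords all nonempty)
lemma pv_fold_eq_maxD (text : String) (xs : List String) (h : ∀ y ∈ xs, 0 < PySem.Str.len y) :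
    List.foldl (pvBStep text) "" xs =
      PySem.List.maxD (xs.filter (fun q => PySem.Str.isIn q text)) PySem.Str.len "" := by
  rw [pv_fold_eq_filter, pv_seed_empty _
    (fun y hy => h y (List.mem_of_mem_filter hy))]
  have : PySem.List.maxD (xs.filter (fun q => PySem.Str.isIn q text)) PySem.Str.len "" =
      (PySem.List.max? (xs.filter (fun q => PySem.Str.isIn q text)) PySem.Str.len).getD "" := by
    unfold PySem.List.maxD
    cases PySem.List.max? (xs.filter (fun q => PySem.Str.isIn q text)) PySem.Str.len <;> rfl
  rw [this, pv_max?_eq_foldl]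

-- the CSV tables split into exactly A's keyword lists
set_option maxRecDepth 10000 in
lemma pv_qual_split :
    (PySem.Str.split? pvQualCsv ",").getD [] =
      ["SUPER PLATINUM", "SUPER CLASSIC", "SUPER ECO", "ECO SPECIAL",
       "ECO GREEN", "ECO SPL", "LIFE STYLE", "LIFESTYLE", "PREMIUM",
       "PLATINUM", "CLASSIC", "DELUXE", "BRONZE", "SILVER", "ULTRA",
       "GOLD", "UV"] := by decide

set_option maxRecDepth 10000 in
lemma pv_col_split :
    (PySem.Str.split? pvColCsv ",").getD [] =
      ["GOLDEN YELLOW", "BRIGHT WHITE", "SUPER WHITE", "BLACK", "RED",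
       "BLUE", "GREEN", "MILKY WHITE", "SUNSHINE WHITE", "BLEACH WHITE",
       "LEMON YELLOW", "BRIGHT ORANGE", "DARK ORANGE", "BABY PINK",
       "DARK PINK", "CRIMSON RED", "LIGHT MAROON", "DARK MAROON",
       "MEDICAL BLUE", "PEACOCK BLUE", "RELIANCE GREEN", "PARROT GREEN",
       "ROYAL BLUE", "NAVY BLUE", "LIGHT GREY", "DARK GREY",
       "CHOCOLATE BROWN", "LIGHT BEIGE", "DARK BEIGE", "WHITE MIX",
       "BLACK MIX", "COLOR MIX", "BEIGE MIX", "WHITE"] := by decide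

-- ===== VERDICT (by name: the statement is the Claim_ definition above) =====
set_option maxHeartbeats 1000000 in
set_option maxRecDepth 10000 in
theorem extract_quality_and_color_spec : Claim_equal_extract_quality_and_color := by
  intro item_name _
  unfold Spec_extract_quality_and_color extract_quality_and_color extract_quality_and_color_alt
    pvLongestMatch
  have hq : ∀ y ∈ ["SUPER PLATINUM", "SUPER CLASSIC", "SUPER ECO", "ECO SPECIAL",
      "ECO GREEN", "ECO SPL", "LIFE STYLE", "LIFESTYLE", "PREMIUM",
      "PLATINUM", "CLASSIC", "DELUXE", "BRONZE", "SILVER", "ULTRA",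
      "GOLD", "UV"], 0 < PySem.Str.len y := by decide
  have hc : ∀ y ∈ ["GOLDEN YELLOW", "BRIGHT WHITE", "SUPER WHITE", "BLACK", "RED",
      "BLUE", "GREEN", "MILKY WHITE", "SUNSHINE WHITE", "BLEACH WHITE",
      "LEMON YELLOW", "BRIGHT ORANGE", "DARK ORANGE", "BABY PINK",
      "DARK PINK", "CRIMSON RED", "LIGHT MAROON", "DARK MAROON",
      "MEDICAL BLUE", "PEACOCK BLUE", "RELIANCE GREEN", "PARROT GREEN",
      "ROYAL BLUE", "NAVY BLUE", "LIGHT GREY", "DARK GREY",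
      "CHOCOLATE BROWN", "LIGHT BEIGE", "DARK BEIGE", "WHITE MIX",
      "BLACK MIX", "COLOR MIX", "BEIGE MIX", "WHITE"], 0 < PySem.Str.len y := by decide
  simp only [pv_qual_split, pv_col_split,
    pv_fold_eq_maxD (PySem.Str.upper item_name) _ hq,
    pv_fold_eq_maxD (PySem.Str.upper item_name) _ hc,
    pv_component]
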